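-- pv_equiv track=rewrite | github.com/sebuzdugan/frai-benchmark | scripts/model_registry.py | _ordered
-- ===== SOURCE A (Python) =====
-- from typing import Any, Dict, Iterable, List, Optional
--
-- MODEL_ORDER = [
--     "moonshotai/kimi-k2.6",
--     "openrouter/elephant-alpha",
--     "z-ai/glm-5.1",
--     "google/gemma-4-31b-it:free",
--     "qwen/qwen3.6-plus",
--     "arcee-ai/trinity-large-thinking",
--     "x-ai/grok-4.20",
--     "gpt-5.4-pro",
--     "gpt-5.2",
--     "gpt-5.2-chat",
--     "gpt-5.2-codex",
--     "gpt-5.1",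
--     "gpt-4o",
--     "DeepSeek-V3.2",
--     "grok-4-fast-reasoning",
--     "Kimi-K2-Thinking",
--     "Mistral-Large-3",
-- ]
--
-- def _ordered(names: Iterable[str]) -> List[str]:
--     seen = set()
--     unique = []
--     for name in names:
--         if name and name not in seen:
--             seen.add(name)
--             unique.append(name)
--
--     order = {name: idx for idx, name in enumerate(MODEL_ORDER)}
--     return sorted(unique, key=lambda name: (order.get(name, len(order)), name.lower()))
-- ===== SOURCE B (Python) =====
-- from typing import Iterable, List
--
-- MODEL_ORDER = [
--     "moonshotai/kimi-k2.6",
--     "openrouter/elephant-alpha",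
--     "z-ai/glm-5.1",
--     "google/gemma-4-31b-it:free",
--     "qwen/qwen3.6-plus",
--     "arcee-ai/trinity-large-thinking",
--     "x-ai/grok-4.20",
--     "gpt-5.4-pro",
--     "gpt-5.2",
--     "gpt-5.2-chat",
--     "gpt-5.2-codex",
--     "gpt-5.1",
--     "gpt-4o",
--     "DeepSeek-V3.2",
--     "grok-4-fast-reasoning",
--     "Kimi-K2-Thinking",
--     "Mistral-Large-3",
-- ]
--
-- def _ordered(names: Iterable[str]) -> List[str]:
--     unique = list(dict.fromkeys(n for n in names if n))
--     uniq_set = set(unique)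
--     known = [m for m in MODEL_ORDER if m in uniq_set]
--     unknown = sorted((n for n in unique if n not in MODEL_ORDER), key=str.lower)
--     return known + unknown
-- ===== Notes on version B (the rewrite author's own statement) =====
-- stated objective: simpler
-- what changed: Instead of sorting the deduped list with a composite (index-dict lookup, lowercase) tuple key, B dedups via dict.fromkeys, emits the known names by a single scan of MODEL_ORDER in its fixed order, and separately stable-sorts the unknown names by str.lower, concatenating the two parts.
import Mathlib
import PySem

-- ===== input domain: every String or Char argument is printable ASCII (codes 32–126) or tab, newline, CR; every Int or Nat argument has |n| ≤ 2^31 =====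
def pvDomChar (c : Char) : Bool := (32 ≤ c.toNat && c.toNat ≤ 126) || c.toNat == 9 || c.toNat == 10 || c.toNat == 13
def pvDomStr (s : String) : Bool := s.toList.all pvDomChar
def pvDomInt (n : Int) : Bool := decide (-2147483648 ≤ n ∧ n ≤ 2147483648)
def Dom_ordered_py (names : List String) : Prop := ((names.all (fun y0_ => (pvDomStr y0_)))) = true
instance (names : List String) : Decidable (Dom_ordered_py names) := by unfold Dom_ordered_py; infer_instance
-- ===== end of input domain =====

-- B replaces A's tuple-key sort of the deduped names by two plain passes — the known names in MODEL_ORDER order, then the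
-- unknown ones sorted case-insensitively — dropping the index dict and the composite key (objective: simpler; not faster).

-- ===== PORT A =====
-- module-level constant MODEL_ORDER
def pvModelOrder : List String :=
  ["moonshotai/kimi-k2.6", "openrouter/elephant-alpha", "z-ai/glm-5.1",
   "google/gemma-4-31b-it:free", "qwen/qwen3.6-plus", "arcee-ai/trinity-large-thinking",
   "x-ai/grok-4.20", "gpt-5.4-pro", "gpt-5.2", "gpt-5.2-chat", "gpt-5.2-codex",
   "gpt-5.1", "gpt-4o", "DeepSeek-V3.2", "grok-4-fast-reasoning", "Kimi-K2-Thinking",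
   "Mistral-Large-3"]

def ordered_py (names : List String) : List String :=
  -- for name in names: if name and name not in seen: seen.add(name); unique.append(name)
  let su := names.foldl
    (fun (p : PySem.Set String × List String) name =>
      if name ≠ "" ∧ name ∉ p.1 then (PySem.Set.add p.1 name, p.2 ++ [name]) else p)
    ((PySem.Set.empty : PySem.Set String), ([] : List String))
  -- order = {name: idx for idx, name in enumerate(MODEL_ORDER)}
  let order : PySem.Dict String Int :=
    (PySem.List.enumerate pvModelOrder 0).foldl (fun d p => d.insert p.2 p.1) PySem.Dict.empty
  -- sorted(unique, key=lambda name: (order.get(name, len(order)), name.lower()))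
  PySem.List.sorted2 su.2 (fun name => order.getD name (order.size : Int))
    (fun name => PySem.Str.lower name)

-- ===== PORT B =====
def ordered_py_alt (names : List String) : List String :=
  -- unique = list(dict.fromkeys(n for n in names if n)); uniq_set = set(unique)
  let unique := PySem.List.dedup (names.filter (fun n => n ≠ ""))
  let uniqSet := PySem.Set.ofList unique
  -- known = [m for m in MODEL_ORDER if m in uniq_set]
  let known := pvModelOrder.filter (fun m => PySem.Set.contains uniqSet m)
  -- unknown = sorted((n for n in unique if n not in MODEL_ORDER), key=str.lower)
  let unknown := PySem.List.sorted (unique.filter (fun n => !pvModelOrder.contains n))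
    (fun n => PySem.Str.lower n)
  known ++ unknown

-- ===== PRECONDITION & SPEC =====
def Spec_ordered_py (names : List String) (out : List String) : Prop := out = ordered_py_alt names
instance (names : List String) (out : List String) : Decidable (Spec_ordered_py names out) := by unfold Spec_ordered_py; infer_instance

-- ===== CLAIM (what is proved, stated in full; the proofs are below) =====
def Claim_equal_ordered_py : Prop := ∀ (names : List String), Dom_ordered_py names → Spec_ordered_py names (ordered_py names)

-- ===== LEMMAS AND PROOFS =====

def pvOrd : PySem.Dict String Int :=
  (PySem.List.enumerate pvModelOrder 0).foldl (fun d p => d.insert p.2 p.1) PySem.Dict.empty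

def pvK1 (n : String) : Int := pvOrd.getD n 17

def pvLt (a b : String) : Bool :=
  decide (pvK1 a < pvK1 b) || (!decide (pvK1 b < pvK1 a) && decide (PySem.Str.lower a < PySem.Str.lower b))

def pvLow (a b : String) : Bool := decide (PySem.Str.lower a < PySem.Str.lower b)

theorem pv_size_eq : ((pvOrd.size : Int)) = 17 := by decide

theorem pv_nodupM : pvModelOrder.Nodup := by decide

theorem pv_k1_lt (y : String) (hy : y ∈ pvModelOrder) : pvK1 y < 17 := by
  have h : ∀ y ∈ pvModelOrder, pvK1 y < 17 := by decide
  exact h y hy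

theorem pv_keys : pvOrd.keys = pvModelOrder := by decide

theorem pv_k1_not_mem (x : String) (hx : x ∉ pvModelOrder) : pvK1 x = 17 := by
  unfold pvK1
  have hn : pvOrd.get? x = none := by
    rw [PySem.Dict.get?_eq_none_iff_not_mem_keys, pv_keys]; exact hx
  rw [PySem.Dict.getD_eq_get?_getD, hn]; rfl

theorem pv_pairwiseM : pvModelOrder.Pairwise (fun a b => pvLt a b = true) := by decide

theorem pv_asym (a b : String) (h : pvLt a b = true) : pvLt b a = false := by
  unfold pvLt at h ⊢
  by_cases hab : pvK1 a < pvK1 b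
  · have hba : ¬ pvK1 b < pvK1 a := not_lt.mpr hab.le
    simp [hab, hba]
  · have h' : ¬ pvK1 b < pvK1 a ∧ PySem.Str.lower a < PySem.Str.lower b := by
      simpa [hab] using h
    simp [h'.1, asymm h'.2]

theorem mem_foldl_insertBy {α : Type} (before : α → α → Bool) (l acc : List α) (y : α) :
    y ∈ l.foldl (fun acc x => PySem.List.insertBy before x acc) acc ↔ y ∈ acc ∨ y ∈ l := by
  induction l generalizing acc with
  | nil => simp
  | cons a l ih =>
    rw [List.foldl_cons, ih]
    simp [PySem.List.insertBy_mem_iff]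
    tauto

theorem insertBy_cons {α : Type} (before : α → α → Bool) (x y : α) (ys : List α) :
    PySem.List.insertBy before x (y :: ys) =
      if before x y then x :: y :: ys else y :: PySem.List.insertBy before x ys := rfl

theorem insertBy_all_true {α : Type} (before : α → α → Bool) (x : α) (ys : List α)
    (h : ∀ y ∈ ys, before x y = true) :
    PySem.List.insertBy before x ys = x :: ys := by
  cases ys with
  | nil => rfl
  | cons y t => rw [insertBy_cons, h y (by simp)]; simp

theorem insertBy_skip {α : Type} (before : α → α → Bool) (x : α) (K U : List α)
    (h : ∀ y ∈ K, before x y = false) :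
    PySem.List.insertBy before x (K ++ U) = K ++ PySem.List.insertBy before x U := by
  induction K with
  | nil => rfl
  | cons k K ih =>
    simp only [List.cons_append, insertBy_cons, h k (by simp)]
    simp only [Bool.false_eq_true, if_false, List.cons.injEq, true_and]
    exact ih (fun y hy => h y (by simp [hy]))

theorem insertBy_congr {α : Type} (before before' : α → α → Bool) (x : α) (ys : List α)
    (h : ∀ y ∈ ys, before x y = before' x y) :
    PySem.List.insertBy before x ys = PySem.List.insertBy before' x ys := by
  induction ys with
  | nil => rfl
  | cons y t ih =>
    rw [insertBy_cons, insertBy_cons, h y (by simp), ih (fun z hz => h z (by simp [hz]))]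

theorem insert_known (x : String) (p : String → Bool) (M U : List String)
    (hnd : M.Nodup) (hx : x ∈ M) (hpx : p x = false)
    (hM : M.Pairwise (fun a b => pvLt a b = true))
    (hU : ∀ y ∈ U, pvLt x y = true) :
    PySem.List.insertBy pvLt x (M.filter p ++ U) =
      M.filter (fun y => p y || y == x) ++ U := by
  induction M with
  | nil => exact absurd hx (by simp)
  | cons m M ih =>
    have hndM := hnd.of_cons
    have hmM : ∀ b ∈ M, pvLt m b = true := (List.pairwise_cons.mp hM).1
    have hMM := (List.pairwise_cons.mp hM).2
    by_cases hmx : m = x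
    · subst hmx
      have hxM : m ∉ M := (List.nodup_cons.mp hnd).1
      have hfilt : M.filter (fun y => p y || y == m) = M.filter p := by
        apply List.filter_congr
        intro y hy
        have : y ≠ m := fun h => hxM (h ▸ hy)
        simp [this]
      simp only [List.filter_cons, hpx, Bool.false_eq_true, if_false, beq_self_eq_true,
        Bool.or_true, if_true, hfilt]
      apply insertBy_all_true
      intro y hy
      rcases List.mem_append.mp hy with h1 | h2
      · exact hmM y (List.mem_of_mem_filter h1)
      · exact hU y h2
    · have hxM : x ∈ M := by
        rcases List.mem_cons.mp hx with h | h
        · exact absurd h.symm hmx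
        · exact h
      have hlt : pvLt x m = false := pv_asym m x (hmM x hxM)
      have hbeq : (m == x) = false := by simp [hmx]
      by_cases hpm : p m = true
      · simp only [List.filter_cons, hpm, if_true, hbeq, Bool.or_false, List.cons_append,
          insertBy_cons, hlt, Bool.false_eq_true, if_false]
        rw [ih hndM hxM hMM]
      · have hpm' : p m = false := by simpa using hpm
        simp only [List.filter_cons, hpm', hbeq, Bool.or_false, Bool.false_eq_true, if_false]
        exact ih hndM hxM hMM
    
theorem pv_main (u : List String) (hnd : u.Nodup) :
    u.foldl (fun acc x => PySem.List.insertBy pvLt x acc) [] =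
      pvModelOrder.filter (fun m => decide (m ∈ u)) ++
        (u.filter (fun n => !pvModelOrder.contains n)).foldl
          (fun acc x => PySem.List.insertBy pvLow x acc) [] := by
  induction u using List.reverseRecOn with
  | nil => simp
  | append_singleton u x ih =>
    have hndu : u.Nodup := hnd.of_append_left
    have hxu : x ∉ u := by
      have := List.disjoint_of_nodup_append hnd
      intro h; exact this h (by simp)
    have hU_mem : ∀ y,
        y ∈ (u.filter (fun n => !pvModelOrder.contains n)).foldl
          (fun acc x => PySem.List.insertBy pvLow x acc) [] →
        y ∈ u ∧ y ∉ pvModelOrder := by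
      intro y hy
      rw [mem_foldl_insertBy] at hy
      rcases hy with h | h
      · simp at h
      · rw [List.mem_filter] at h
        refine ⟨h.1, ?_⟩
        simpa [List.contains_eq_mem] using h.2
    rw [List.foldl_append, List.foldl_cons, List.foldl_nil, ih hndu]
    by_cases hxM : x ∈ pvModelOrder
    · -- known name: goes into the MODEL_ORDER portion, before all unknowns
      have hq : (!pvModelOrder.contains x) = false := by
        simp [List.contains_eq_mem, hxM]
      rw [insert_known x (fun m => decide (m ∈ u)) pvModelOrder _ pv_nodupM hxM
        (by simp [hxu]) pv_pairwiseM]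
      · rw [List.filter_append, List.filter_cons, hq]
        simp only [Bool.false_eq_true, if_false, List.filter_nil, List.append_nil]
        congr 1
        apply List.filter_congr
        intro m _
        have hbx : (m == x) = decide (m = x) := by by_cases h : m = x <;> simp [h]
        simp [List.mem_append, Bool.or_comm, hbx]
      · intro y hy
        obtain ⟨hyu, hyM⟩ := hU_mem y hy
        unfold pvLt
        have h1 : pvK1 x < 17 := pv_k1_lt x hxM
        have h2 : pvK1 y = 17 := pv_k1_not_mem y hyM
        simp [h2, h1]
    · -- unknown name: skips the whole MODEL_ORDER portion, inserted among unknowns by lower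
      have hq : (!pvModelOrder.contains x) = true := by
        simp [List.contains_eq_mem, hxM]
      have hk1x : pvK1 x = 17 := pv_k1_not_mem x hxM
      rw [insertBy_skip]
      · rw [List.filter_append, List.filter_cons, hq]
        simp only [if_true, List.filter_nil, List.foldl_append, List.foldl_cons, List.foldl_nil]
        congr 1
        · apply List.filter_congr
          intro m hm
          have : m ≠ x := fun h => hxM (h ▸ hm)
          simp [List.mem_append, this]
        · exact insertBy_congr pvLt pvLow x _ (by
            intro y hy
            obtain ⟨_, hyM⟩ := hU_mem y hy
            have hk1y : pvK1 y = 17 := pv_k1_not_mem y hyM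
            unfold pvLt pvLow
            simp [hk1x, hk1y])
      · intro y hy
        have hyM : y ∈ pvModelOrder := List.mem_of_mem_filter hy
        have h1 : pvK1 y < 17 := pv_k1_lt y hyM
        have ha : ¬ pvK1 x < pvK1 y := by rw [hk1x]; exact not_lt.mpr h1.le
        have hb : pvK1 y < pvK1 x := by rw [hk1x]; exact h1
        unfold pvLt
        simp [ha, hb]

theorem pv_loopA (names : List String) (s : List String) :
    names.foldl
      (fun (p : PySem.Set String × List String) name =>
        if name ≠ "" ∧ name ∉ p.1 then (PySem.Set.add p.1 name, p.2 ++ [name]) else p)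
      (s, s) =
    ((names.filter (fun n => n ≠ "")).foldl PySem.Set.add s,
     (names.filter (fun n => n ≠ "")).foldl PySem.Set.add s) := by
  induction names generalizing s with
  | nil => rfl
  | cons name rest ih =>
    by_cases h0 : name = ""
    · subst h0; simpa using ih s
    · rw [List.foldl_cons, List.filter_cons]
      simp only [h0, ne_eq, not_false_iff, decide_true, if_true, List.foldl_cons]
      by_cases hm : name ∈ s
      · have hadd : PySem.Set.add s name = s := by
          unfold PySem.Set.add PySem.Set.contains
          simp [List.contains_eq_mem, hm]
        simp only [hm, not_true, and_false, if_false, hadd]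
        exact ih s
      · have hadd : PySem.Set.add s name = s ++ [name] := by
          unfold PySem.Set.add PySem.Set.contains
          simp [List.contains_eq_mem, hm]
        simp only [hm, not_false_iff, and_true, if_true, hadd]
        exact hadd ▸ ih (PySem.Set.add s name)

theorem pv_sorted2_eq (u : List String) :
    PySem.List.sorted2 u pvK1 (fun n => PySem.Str.lower n) =
      u.foldl (fun acc x => PySem.List.insertBy pvLt x acc) [] := rfl

-- ===== VERDICT (by name: the statement is the Claim_ definition above) =====
theorem ordered_py_spec : Claim_equal_ordered_py := by
  unfold Claim_equal_ordered_py
  intro names _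
  unfold Spec_ordered_py ordered_py ordered_py_alt
  simp only []
  set F := names.filter (fun n => n ≠ "") with hF
  have hloop := pv_loopA names []
  have hofList : F.foldl PySem.Set.add ([] : List String) = PySem.Set.ofList F := rfl
  rw [show ((PySem.Set.empty : PySem.Set String), ([] : List String)) = (([] : List String), ([] : List String)) from rfl]
  rw [hloop, hofList]
  set u := PySem.Set.ofList F with hu
  have hndu : u.Nodup := PySem.Set.nodup_ofList F
  have hkey : (fun name => PySem.Dict.getD
      ((PySem.List.enumerate pvModelOrder 0).foldl (fun d p => d.insert p.2 p.1) PySem.Dict.empty)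
      name ((PySem.Dict.size ((PySem.List.enumerate pvModelOrder 0).foldl (fun d p => d.insert p.2 p.1) PySem.Dict.empty) : Int))) = pvK1 := by
    funext n
    show pvOrd.getD n ((pvOrd.size : Int)) = pvK1 n
    rw [pv_size_eq]; rfl
  rw [hkey, pv_sorted2_eq, pv_main u hndu]
  rw [PySem.List.dedup_eq_ofList, ← hu]
  congr 1
  · apply List.filter_congr
    intro m _
    unfold PySem.Set.contains
    rw [List.contains_eq_mem]
    congr 1
    simp [PySem.Set.mem_ofList]
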